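-- pv_equiv track=rewrite | github.com/voitta-ai/voitta-yolt | hooks/shell_classifier.py | parse_aws_positionals
-- ===== SOURCE A (Python) =====
-- def parse_aws_positionals(cmd_args):
--     """Walk aws CLI args skipping flags (--profile prod, --region us-east-1,
--     --no-cli-pager, etc.). Return (service, operation, trailing_positionals).
--     Either may be None."""
--     service = None
--     operation = None
--     trailing = []
--
--     i = 0
--     while i < len(cmd_args):
--         tok = cmd_args[i]
--         if tok.startswith("--"):
--             if "=" in tok:
--                 i += 1
--                 continue
--             # Known valueless long flags for aws CLI
--             if tok in {"--no-cli-pager", "--no-paginate", "--no-verify-ssl",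
--                       "--no-sign-request", "--debug"}:
--                 i += 1
--                 continue
--             # Default: assume value follows (covers --profile, --region, etc.)
--             if i + 1 < len(cmd_args) and not cmd_args[i + 1].startswith("-"):
--                 i += 2
--                 continue
--             i += 1
--             continue
--         if tok.startswith("-") and len(tok) > 1:
--             # Short flags - aws only has a few, most long-form
--             i += 1
--             continue
--         if service is None:
--             service = tok
--             i += 1
--             continue
--         if operation is None:
--             operation = tok
--             i += 1
--             continue
--         trailing.append(tok)
--         i += 1
--
--     retval = (service, operation, trailing)
--     return retval
-- ===== SOURCE B (Python) =====
-- VALUELESS = {"--no-cli-pager", "--no-paginate", "--no-verify-ssl",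
--              "--no-sign-request", "--debug"}
--
--
-- def parse_aws_positionals(cmd_args):
--     """Single token-at-a-time finite-state machine: an `expect_value` flag
--     replaces A's index lookahead (i+2 strides).  A token is consumed as a
--     flag value iff the previous token announced a value-taking long flag and
--     this token does not start with '-'.  Positionals are collected and then
--     assigned roles by position."""
--     positionals = []
--     expect_value = False
--     for tok in cmd_args:
--         if expect_value and not tok.startswith("-"):
--             expect_value = False  # consumed as the preceding flag's value
--         elif tok.startswith("--"):
--             expect_value = "=" not in tok and tok not in VALUELESS
--         elif tok.startswith("-") and len(tok) > 1:
--             expect_value = False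
--         else:
--             expect_value = False
--             positionals.append(tok)
--     service = positionals[0] if positionals else None
--     operation = positionals[1] if len(positionals) > 1 else None
--     return (service, operation, positionals[2:])
-- ===== Notes on version B (the rewrite author's own statement) =====
-- stated objective: alternative
-- what changed: B replaces A's index-based lookahead scan (variable i+=1/i+=2 strides peeking at cmd_args[i+1]) with a token-at-a-time finite-state machine carrying an expect_value flag, collecting positionals into one list and assigning service/operation/trailing afterwards by position.
import Mathlib
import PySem

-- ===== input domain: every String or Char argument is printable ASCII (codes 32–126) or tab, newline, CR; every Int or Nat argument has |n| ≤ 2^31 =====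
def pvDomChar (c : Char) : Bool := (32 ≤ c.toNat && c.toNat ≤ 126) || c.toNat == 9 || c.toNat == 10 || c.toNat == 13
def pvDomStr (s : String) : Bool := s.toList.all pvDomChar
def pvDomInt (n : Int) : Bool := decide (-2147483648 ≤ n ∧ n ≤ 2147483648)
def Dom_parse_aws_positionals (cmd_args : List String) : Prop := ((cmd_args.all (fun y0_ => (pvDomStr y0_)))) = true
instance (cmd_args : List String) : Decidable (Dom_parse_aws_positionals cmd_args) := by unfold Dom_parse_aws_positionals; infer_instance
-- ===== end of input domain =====

-- B replaces A's index lookahead (i+=2 strides) with a token-at-a-time finite-state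
-- machine carrying an expect_value flag, assigning roles by position afterwards (objective: alternative).

-- ===== PORT A =====
-- tok in {"--no-cli-pager", ...}
def pvValueless (tok : String) : Bool :=
  tok == "--no-cli-pager" || tok == "--no-paginate" || tok == "--no-verify-ssl" ||
  tok == "--no-sign-request" || tok == "--debug"

-- A's while-loop over the remaining suffix of cmd_args (i only moves forward, and only
-- cmd_args[i] / cmd_args[i+1] are read), carrying the (service, operation, trailing) state
def pvLoopA : List String → Option String → Option String → List String →
    Option String × Option String × List String
  | [], s, o, t => (s, o, t)
  | tok :: rest, s, o, t =>
    if PySem.Str.startswith tok "--" then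
      if PySem.Str.isIn "=" tok then
        pvLoopA rest s o t
      else if pvValueless tok then
        pvLoopA rest s o t
      else
        match rest with
        | next :: rest' =>
          if !PySem.Str.startswith next "-" then pvLoopA rest' s o t   -- i += 2
          else pvLoopA (next :: rest') s o t
        | [] => pvLoopA [] s o t
    else if PySem.Str.startswith tok "-" && decide (1 < PySem.Str.len tok) then
      pvLoopA rest s o t
    else
      match s with
      | none => pvLoopA rest (some tok) o t
      | some _ =>
        match o with
        | none => pvLoopA rest s (some tok) t
        | some _ => pvLoopA rest s o (t ++ [tok])

def parse_aws_positionals (cmd_args : List String) : Option String × Option String × List String :=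
  pvLoopA cmd_args none none []

-- ===== PORT B =====
-- the VALUELESS set of Source B
def pvValuelessSet : List String :=
  ["--no-cli-pager", "--no-paginate", "--no-verify-ssl", "--no-sign-request", "--debug"]

-- one step of B's finite-state machine: state = (expect_value, positionals so far)
def pvStepB (st : Bool × List String) (tok : String) : Bool × List String :=
  if st.1 && !PySem.Str.startswith tok "-" then
    (false, st.2)                                    -- consumed as the preceding flag's value
  else if PySem.Str.startswith tok "--" then
    (!PySem.Str.isIn "=" tok && !pvValuelessSet.contains tok, st.2)
  else if PySem.Str.startswith tok "-" && decide (1 < PySem.Str.len tok) then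
    (false, st.2)
  else
    (false, st.2 ++ [tok])

def parse_aws_positionals_alt (cmd_args : List String) : Option String × Option String × List String :=
  let positionals := (List.foldl pvStepB (false, []) cmd_args).2
  let service : Option String := match positionals with | [] => none | p :: _ => some p
  let operation : Option String := match positionals with | _ :: q :: _ => some q | _ => none
  (service, operation, PySem.List.slice positionals (some 2) none)   -- positionals[2:]

-- ===== PRECONDITION & SPEC =====
def Spec_parse_aws_positionals (cmd_args : List String) (out : Option String × Option String × List String) : Prop := out = parse_aws_positionals_alt cmd_args
instance (cmd_args : List String) (out : Option String × Option String × List String) : Decidable (Spec_parse_aws_positionals cmd_args out) := by unfold Spec_parse_aws_positionals; infer_instance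

-- ===== CLAIM (what is proved, stated in full; the proofs are below) =====
def Claim_equal_parse_aws_positionals : Prop := ∀ (cmd_args : List String), Dom_parse_aws_positionals cmd_args → Spec_parse_aws_positionals cmd_args (parse_aws_positionals cmd_args)

-- ===== LEMMAS AND PROOFS =====

-- the role-assignment machine: feeding the positional tokens one by one into A's three slots
def pvFeed : Option String → Option String → List String → List String →
    Option String × Option String × List String
  | s, o, t, [] => (s, o, t)
  | none, o, t, p :: ps => pvFeed (some p) o t ps
  | some s, none, t, p :: ps => pvFeed (some s) (some p) t ps
  | some s, some o, t, p :: ps => pvFeed (some s) (some o) (t ++ [p]) ps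

theorem pvFeed_step (s o : Option String) (t : List String) (p : String) (ps : List String) :
    pvFeed s o t (p :: ps) =
      match s with
      | none => pvFeed (some p) o t ps
      | some _ =>
        match o with
        | none => pvFeed s (some p) t ps
        | some _ => pvFeed s o (t ++ [p]) ps := by
  cases s <;> cases o <;> rfl

theorem pvFeed_full (s o : String) (t ps : List String) :
    pvFeed (some s) (some o) t ps = (some s, some o, t ++ ps) := by
  induction ps generalizing t with
  | nil => simp [pvFeed]
  | cons p ps ih => simp [pvFeed, ih]

-- the two valueless-set tests coincide
theorem pvMem_eq (tok : String) : decide (tok ∈ pvValuelessSet) = pvValueless tok := by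
  rw [Bool.eq_iff_iff]
  simp [pvValuelessSet, pvValueless]
  tauto

-- B's positional accumulator factors out of the fold (the boolean state never reads it)
theorem pvStepB_acc (e : Bool) (acc : List String) (tok : String) :
    pvStepB (e, acc) tok = ((pvStepB (e, []) tok).1, acc ++ (pvStepB (e, []) tok).2) := by
  unfold pvStepB; dsimp only; split_ifs <;> simp

theorem pvRunB_acc : ∀ (toks : List String) (e : Bool) (acc : List String),
    (List.foldl pvStepB (e, acc) toks).2 = acc ++ (List.foldl pvStepB (e, []) toks).2
  | [], e, acc => by simp
  | tok :: toks, e, acc => by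
      rw [List.foldl_cons, List.foldl_cons, pvStepB_acc e acc tok]
      rcases h : pvStepB (e, []) tok with ⟨e', acc'⟩
      rw [pvRunB_acc toks e' (acc ++ acc'), pvRunB_acc toks e' acc']
      simp

-- the key invariant: A's lookahead loop equals B's FSM collection fed into the slots
theorem pvLoopA_eq_feed : ∀ (rest : List String) (s o : Option String) (t : List String),
    pvLoopA rest s o t = pvFeed s o t (List.foldl pvStepB (false, []) rest).2
  | [], s, o, t => by simp [pvLoopA, pvFeed]
  | [tok], s, o, t => by
      rw [pvLoopA.eq_def]
      dsimp only
      by_cases h1 : PySem.Chars.startswith tok.toList ['-', '-'] = true <;>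
      by_cases h2 : PySem.Chars.isIn ['='] tok.toList = true <;>
      by_cases h3 : pvValueless tok = true <;>
      by_cases h5a : PySem.Chars.startswith tok.toList ['-'] = true <;>
      by_cases h5b : 1 < tok.length <;>
        (try cases s) <;> (try cases o) <;>
        simp_all [pvLoopA, pvStepB, pvMem_eq, pvFeed] <;>
        (try simp_all [show ¬(1 < tok.length) from by omega, pvFeed])
  | tok :: next :: rest', s, o, t => by
      rw [pvLoopA.eq_def]
      dsimp only
      by_cases h1 : PySem.Chars.startswith tok.toList ['-', '-'] = true
      · by_cases h2 : PySem.Chars.isIn ['='] tok.toList = true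
        · simp [h1, h2, pvStepB, pvMem_eq, pvLoopA_eq_feed (next :: rest')]
        · by_cases h3 : pvValueless tok = true
          · simp [h1, h2, h3, pvStepB, pvMem_eq, pvLoopA_eq_feed (next :: rest')]
          · -- value-taking long flag: B's state becomes true
            by_cases h4 : PySem.Chars.startswith next.toList ['-'] = true
            · -- next starts with '-': not consumed as a value; the boolean state is irrelevant for it
              simp [h1, h2, h3, h4, pvStepB, pvMem_eq,
                    pvLoopA_eq_feed (next :: rest'), List.foldl_cons]
            · -- next consumed as the flag's value: both skip to rest'
              simp [h1, h2, h3, h4, pvStepB, pvMem_eq,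
                    pvLoopA_eq_feed rest', List.foldl_cons]
      · by_cases h5a : PySem.Chars.startswith tok.toList ['-'] = true
        · by_cases h5b : 1 < tok.length
          · -- short flag: both skip it
            simp [h1, h5a, h5b, pvStepB, pvLoopA_eq_feed (next :: rest'), List.foldl_cons]
          · -- positional token (e.g. "-" alone)
            have hstep : pvStepB (false, []) tok = (false, [tok]) := by
              simp [pvStepB, h1, h5b]
            rw [List.foldl_cons, hstep, pvRunB_acc (next :: rest') false [tok],
                List.singleton_append, pvFeed_step]
            cases s <;> cases o <;>
              simp [h1, h5a, h5b, pvLoopA_eq_feed (next :: rest'), pvFeed]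
        · -- positional token
          have hstep : pvStepB (false, []) tok = (false, [tok]) := by
            simp [pvStepB, h1, h5a]
          rw [List.foldl_cons, hstep, pvRunB_acc (next :: rest') false [tok],
              List.singleton_append, pvFeed_step]
          cases s <;> cases o <;>
            simp [h1, h5a, pvLoopA_eq_feed (next :: rest'), pvFeed]

-- ===== VERDICT (by name: the statement is the Claim_ definition above) =====
theorem parse_aws_positionals_spec : Claim_equal_parse_aws_positionals := by
  intro cmd_args _
  unfold Spec_parse_aws_positionals parse_aws_positionals parse_aws_positionals_alt
  rw [pvLoopA_eq_feed]
  match h : (List.foldl pvStepB (false, []) cmd_args).2 with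
  | [] => simp [pvFeed, PySem.List.slice]
  | [p] => simp [pvFeed, PySem.List.slice]
  | p :: q :: ps =>
      simp only [pvFeed, pvFeed_full]
      have : PySem.List.slice (p :: q :: ps) (some 2) none = ps := by
        rw [PySem.List.slice_from _ (by norm_num)]; rfl
      simp [this]
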